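-- pv_equiv track=rewrite | github.com/Kuuuube/Misc_Scripts | scripts_and_programs/clemenpine_word_list_compressor/original_source/compress.py | get_trigrams
-- ===== SOURCE A (Python) =====
-- from typing import List
--
-- def get_trigrams(texts: List[str]):
--
--     trigrams = {}
--
--     counts = {
--         'start': {},
--         'end': {},
--     }
--
--     word_count = len(texts)
--     for word in texts:
--
--         padded_word = ' ' + word + ' '
--         for i in range(len(padded_word) - 2):
--             seq = padded_word[i:i+3]
--             if not seq in trigrams:
--                 trigrams[seq] = word_count
--             else:
--                 trigrams[seq] += word_count
--
--         if not word[0] in counts['start']: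
--             counts['start'][word[0]] = 1
--         else:
--             counts['start'][word[0]] += 1
--
--         if not word[-1] in counts['end']:
--             counts['end'][word[-1]] = 1
--         else:
--             counts['end'][word[-1]] += 1
--
--     for start in counts['start']:
--         for end in counts['end']:
--             trigrams[end + ' ' + start] = counts['start'][start] * counts['end'][end]
--
--     # return dict(sorted(trigrams.items(), key=lambda x: x[1], reverse=True))
--     return trigrams
-- ===== SOURCE B (Python) =====
-- def get_trigrams(texts):
--     # Phase 1: materialize the occurrence streams (no counting here).
--     occ = []
--     starts = []
--     ends = []
--     for word in texts:
--         padded = ' ' + word + ' '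
--         occ += [padded[i:i+3] for i in range(len(padded) - 2)]
--         starts.append(word[0])
--         ends.append(word[-1])
--
--     # Phase 2: sort-then-scan counting (run-length encode each sorted stream).
--     def run_counts(xs):
--         counts = {}
--         ys = sorted(xs)
--         n = len(ys)
--         i = 0
--         while i < n:
--             head = ys[i]
--             j = i + 1
--             while j < n and ys[j] == head:
--                 j += 1
--             counts[head] = j - i
--             i = j
--         return counts
--
--     tri_count = run_counts(occ)
--     start_count = run_counts(starts)
--     end_count = run_counts(ends)
--
--     # Phase 3: emit in first-occurrence order, scaled; then boundary products.
--     word_count = len(texts)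
--     trigrams = {}
--     for t in dict.fromkeys(occ):
--         trigrams[t] = tri_count[t] * word_count
--     for s in dict.fromkeys(starts):
--         for e in dict.fromkeys(ends):
--             trigrams[e + ' ' + s] = start_count[s] * end_count[e]
--     return trigrams
-- ===== Notes on version B (the rewrite author's own statement) =====
-- stated objective: alternative
-- what changed: B first materializes flat occurrence streams (all padded trigram windows, start chars, end chars), counts each stream by sorting it and run-length-scanning the sorted list (no incremental dict counters at all), and only then emits the result dict in first-occurrence order scaled by word_count, followed by the boundary-product overwrites.
import Mathlib
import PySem

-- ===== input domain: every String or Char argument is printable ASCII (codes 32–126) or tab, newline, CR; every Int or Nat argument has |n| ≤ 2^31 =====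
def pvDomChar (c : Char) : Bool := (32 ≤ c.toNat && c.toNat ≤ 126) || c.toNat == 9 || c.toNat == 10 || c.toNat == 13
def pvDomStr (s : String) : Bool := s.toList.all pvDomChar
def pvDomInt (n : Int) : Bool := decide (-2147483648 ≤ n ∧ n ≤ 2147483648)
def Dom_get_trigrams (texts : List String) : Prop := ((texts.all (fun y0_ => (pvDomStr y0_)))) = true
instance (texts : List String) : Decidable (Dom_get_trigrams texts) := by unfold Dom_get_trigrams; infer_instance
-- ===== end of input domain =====

-- B replaces A's fused incremental dict-counter loop by: materialize the flat occurrence streams,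
-- count each by sort + run-length scan, then emit the dict in a separate first-occurrence pass
-- (objective: alternative).

-- ===== PORT A =====
-- A-side helper: the body of A's 'for word in texts' loop; state = (trigrams, counts['start'], counts['end']).
-- word[0] / word[-1] raise IndexError on an empty word: PySem.List.pyGet? is none there; that input is
-- outside Pre_ and the port uses a dummy ' ' there.
def pyA_body (word_count : Int)
    (acc : PySem.Dict String Int × PySem.Dict Char Int × PySem.Dict Char Int) (word : String) :
    PySem.Dict String Int × PySem.Dict Char Int × PySem.Dict Char Int :=
  let p : List Char := ' ' :: word.toList ++ [' ']    -- padded_word = ' ' + word + ' '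
  let t := (PySem.List.pyRange 0 ((p.length : Int) - 2)).foldl (fun t i =>
      let seq := String.ofList (PySem.List.slice p (some i) (some (i + 3)))
      if ¬ (t.contains seq) then t.insert seq word_count
      else t.modify seq 0 (· + word_count)) acc.1
  let c0 := (PySem.List.pyGet? word.toList 0).getD ' '          -- word[0]
  let s := if ¬ (acc.2.1.contains c0) then acc.2.1.insert c0 1 else acc.2.1.modify c0 0 (· + 1)
  let c1 := (PySem.List.pyGet? word.toList (-1)).getD ' '       -- word[-1]
  let e := if ¬ (acc.2.2.contains c1) then acc.2.2.insert c1 1 else acc.2.2.modify c1 0 (· + 1)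
  (t, s, e)

def get_trigrams (texts : List String) : List (String × Int) :=
  let word_count : Int := texts.length
  let res := texts.foldl (pyA_body word_count) (PySem.Dict.empty, PySem.Dict.empty, PySem.Dict.empty)
  let tri := res.2.1.keys.foldl (fun t s =>
    res.2.2.keys.foldl (fun t e =>
      t.insert (String.ofList [e, ' ', s]) (res.2.1.getD s 0 * res.2.2.getD e 0)) t) res.1
  tri.items

-- ===== PORT B =====
-- Source B's inner 'while j < n and ys[j] == head: j += 1' scans forward from index i+1; ported as
-- the length of the run of elements equal to head = ys[i] at the front of the remaining suffix: j - i = 1 + pvRunLen.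
def pvRunLen {α : Type} [BEq α] (head : α) : List α → Nat
  | [] => 0
  | y :: ys => if y == head then pvRunLen head ys + 1 else 0

-- Source B's outer 'while i < n: … counts[ys[i]] = j - i; i = j' walks the sorted list run by run; ported as
-- recursion on the suffix ys[i:]: the next suffix ys[j:] is rest.drop (pvRunLen head rest).
def pvRunCounts {α : Type} [BEq α] : List α → PySem.Dict α Int → PySem.Dict α Int
  | [], counts => counts
  | head :: rest, counts =>
      pvRunCounts (rest.drop (pvRunLen head rest))
        (counts.insert head ((1 + pvRunLen head rest : Nat) : Int))
  termination_by ys _ => ys.length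
  decreasing_by simp

-- run_counts(xs) = run-length counts of sorted(xs)
def pvRunCountsOf {α : Type} [BEq α] [LT α] [DecidableLT α] (xs : List α) : PySem.Dict α Int :=
  pvRunCounts (PySem.List.sorted xs (fun x => x) false) PySem.Dict.empty

-- tri_count[t] / start_count[s] / end_count[e] are dict lookups that cannot miss (the key is drawn
-- from the very stream the dict counts); ported as getD 0, exact on those keys.
def get_trigrams_alt (texts : List String) : List (String × Int) :=
  let acc := texts.foldl (fun (acc : List String × List Char × List Char) word =>
      let p : List Char := ' ' :: word.toList ++ [' ']    -- padded = ' ' + word + ' '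
      (acc.1 ++ (PySem.List.pyRange 0 ((p.length : Int) - 2)).map
          (fun i => String.ofList (PySem.List.slice p (some i) (some (i + 3)))),
       acc.2.1 ++ [(PySem.List.pyGet? word.toList 0).getD ' '],
       acc.2.2 ++ [(PySem.List.pyGet? word.toList (-1)).getD ' ']))
    ([], [], [])
  let triCount := pvRunCountsOf acc.1
  let startCount := pvRunCountsOf acc.2.1
  let endCount := pvRunCountsOf acc.2.2
  let word_count : Int := texts.length
  let tri := (PySem.List.dedup acc.1).foldl
      (fun d t => d.insert t (triCount.getD t 0 * word_count)) PySem.Dict.empty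
  let tri := (PySem.List.dedup acc.2.1).foldl (fun t s =>
      (PySem.List.dedup acc.2.2).foldl (fun t e =>
        t.insert (String.ofList [e, ' ', s]) (startCount.getD s 0 * endCount.getD e 0)) t) tri
  tri.items

-- ===== PRECONDITION & SPEC =====
-- Pre_ excludes lists containing an empty word, on which the Python A (and B) raises IndexError at word[0].
def Pre_get_trigrams (texts : List String) : Prop := ∀ w ∈ texts, w ≠ ""
instance (texts : List String) : Decidable (Pre_get_trigrams texts) := by unfold Pre_get_trigrams; infer_instance
def pvWitness_get_trigrams : List String := (["ab", "b"])

def Spec_get_trigrams (texts : List String) (out : List (String × Int)) : Prop := out = get_trigrams_alt texts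
instance (texts : List String) (out : List (String × Int)) : Decidable (Spec_get_trigrams texts out) := by unfold Spec_get_trigrams; infer_instance

-- ===== CLAIM =====
def Claim_equal_get_trigrams : Prop := ∀ (texts : List String), Dom_get_trigrams texts → Pre_get_trigrams texts → Spec_get_trigrams texts (get_trigrams texts)

-- ===== LEMMAS AND PROOFS =====

-- the insert-with-accumulated-value step A's trigram loop reduces to
def pvStep (c : Int) (d : PySem.Dict String Int) (x : String) : PySem.Dict String Int :=
  d.insert x (d.getD x 0 + c)

-- the trigram-key sequence of one word
def pvKeyf (w : String) : List String :=
  (PySem.List.pyRange 0 (((' ' :: w.toList ++ [' ']).length : Int) - 2)).map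
    (fun i => String.ofList (PySem.List.slice (' ' :: w.toList ++ [' ']) (some i) (some (i + 3))))

def pvC0 (w : String) : Char := (PySem.List.pyGet? w.toList 0).getD ' '
def pvC1 (w : String) : Char := (PySem.List.pyGet? w.toList (-1)).getD ' '

-- the canonical shape A's loop body reduces to
def pvBody (c : Int)
    (acc : PySem.Dict String Int × PySem.Dict Char Int × PySem.Dict Char Int) (w : String) :
    PySem.Dict String Int × PySem.Dict Char Int × PySem.Dict Char Int :=
  ((pvKeyf w).foldl (pvStep c) acc.1,
   acc.2.1.insert (pvC0 w) (acc.2.1.getD (pvC0 w) 0 + 1),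
   acc.2.2.insert (pvC1 w) (acc.2.2.getD (pvC1 w) 0 + 1))

-- A's if/else update is the insert-of-getD step
theorem pvStepA_eq (d : PySem.Dict String Int) (k : String) (c : Int) :
    (if ¬ (d.contains k) then d.insert k c else d.modify k 0 (· + c)) = pvStep c d k := by
  by_cases h : d.contains k = true
  · simp [h, PySem.Dict.modify, pvStep]
  · simp only [Bool.not_eq_true] at h
    simp [h, pvStep, PySem.Dict.getD_of_not_contains _ _ h]

theorem pvCStepA_eq (d : PySem.Dict Char Int) (k : Char) :
    (if ¬ (d.contains k) then d.insert k 1 else d.modify k 0 (· + 1)) =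
      d.insert k (d.getD k 0 + 1) := by
  by_cases h : d.contains k = true
  · simp [h, PySem.Dict.modify]
  · simp only [Bool.not_eq_true] at h
    simp [h, PySem.Dict.getD_of_not_contains _ _ h]

-- A's loop body, rewritten into canonical shape
theorem pyA_body_eq (wc : Int) : pyA_body wc = pvBody wc := by
  funext acc w
  unfold pyA_body pvBody pvKeyf pvC0 pvC1
  dsimp only
  refine congrArg₂ Prod.mk ?_ (congrArg₂ Prod.mk (pvCStepA_eq _ _) (pvCStepA_eq _ _))
  rw [List.foldl_map]
  refine List.foldl_ext _ _ _ fun i _ t => ?_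
  exact pvStepA_eq _ _ _

-- A's loop over texts splits into three independent folds, with the trigram one flattened
theorem pvSplit (c : Int) (texts : List String)
    (t0 : PySem.Dict String Int) (s0 e0 : PySem.Dict Char Int) :
    texts.foldl (pvBody c) (t0, s0, e0) =
      ((texts.flatMap pvKeyf).foldl (pvStep c) t0,
       texts.foldl (fun s w => s.insert (pvC0 w) (s.getD (pvC0 w) 0 + 1)) s0,
       texts.foldl (fun e w => e.insert (pvC1 w) (e.getD (pvC1 w) 0 + 1)) e0) := by
  induction texts generalizing t0 s0 e0 with
  | nil => rfl
  | cons w ws ih => simp [pvBody, List.foldl_append, ih]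

-- A's char tally loop is Counter of the projected stream
theorem pvCharCounter (f : String → Char) (texts : List String) :
    texts.foldl (fun s w => s.insert (f w) (s.getD (f w) 0 + 1)) PySem.Dict.empty =
      PySem.Dict.counter (texts.map f) := by
  rw [← PySem.Dict.foldl_insert_getD_add_one_eq_counter, List.foldl_map]

-- B's accumulation loop materializes the three streams
theorem pvAccSplit (texts : List String) (a : List String) (b c : List Char) :
    texts.foldl (fun (acc : List String × List Char × List Char) word =>
      (acc.1 ++ (PySem.List.pyRange 0 (((' ' :: word.toList ++ [' ']).length : Int) - 2)).map
          (fun i => String.ofList (PySem.List.slice (' ' :: word.toList ++ [' ']) (some i) (some (i + 3)))),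
       acc.2.1 ++ [(PySem.List.pyGet? word.toList 0).getD ' '],
       acc.2.2 ++ [(PySem.List.pyGet? word.toList (-1)).getD ' '])) (a, b, c) =
      (a ++ texts.flatMap pvKeyf, b ++ texts.map pvC0, c ++ texts.map pvC1) := by
  induction texts generalizing a b c with
  | nil => simp
  | cons w ws ih =>
    rw [List.foldl_cons, ih]
    simp [pvKeyf, pvC0, pvC1]

-- value of A's accumulate-by-c fold
theorem pvGetD_foldl_step (c : Int) (l : List String) (d : PySem.Dict String Int) (v : String) :
    (l.foldl (pvStep c) d).getD v 0 = d.getD v 0 + (l.count v : Int) * c := by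
  induction l generalizing d with
  | nil => simp
  | cons x xs ih =>
    rw [List.foldl_cons, ih]
    by_cases h : v = x
    · subst h
      simp [pvStep]
      ring
    · simp [pvStep, PySem.Dict.getD_insert, h, Ne.symm h]

-- A's pre-boundary trigram dict, itemized
theorem pvItemsA (occ : List String) (wc : Int) :
    (occ.foldl (pvStep wc) PySem.Dict.empty).items =
      (PySem.Set.ofList occ).map (fun k => (k, (occ.count k : Int) * wc)) := by
  have nd : (occ.foldl (pvStep wc) PySem.Dict.empty).keys.Nodup :=
    PySem.Dict.nodup_keys_foldl_insert occ (fun d x => d.getD x 0 + wc)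
      PySem.Dict.empty PySem.Dict.nodup_keys_empty
  rw [PySem.Dict.items_eq_map_keys _ nd 0]
  have hk : (occ.foldl (pvStep wc) PySem.Dict.empty).keys =
      PySem.Set.update PySem.Dict.empty.keys occ :=
    PySem.Dict.keys_foldl_insert occ (fun d x => d.getD x 0 + wc) PySem.Dict.empty
  rw [hk, show (PySem.Dict.empty : PySem.Dict String Int).keys = [] from rfl,
    PySem.Set.update_nil_left]
  refine List.map_congr_left fun k _ => ?_
  rw [pvGetD_foldl_step]
  simp

-- B's emission loop over distinct keys, itemized
theorem pvItemsB (occ : List String) (f : String → Int) :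
    ((PySem.List.dedup occ).foldl (fun d t => d.insert t (f t)) PySem.Dict.empty).items =
      (PySem.List.dedup occ).map (fun t => (t, f t)) := by
  have h := PySem.Dict.items_foldl_insert_fresh (PySem.List.dedup occ)
      (fun t : String => t) (fun t => f t) PySem.Dict.empty
      (fun a _ => PySem.Dict.contains_empty _) (by simp)
  simpa using h

-- run-length structure of a sorted run: count = run length, head exhausted, run is replicate
theorem pvRunStruct {α : Type} [BEq α] [LawfulBEq α] [LinearOrder α]
    (head : α) (rest : List α) (hall : ∀ y ∈ rest, head ≤ y)
    (hp : rest.Pairwise (· ≤ ·)) :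
    rest.count head = pvRunLen head rest ∧
      head ∉ rest.drop (pvRunLen head rest) ∧
      rest.take (pvRunLen head rest) = List.replicate (pvRunLen head rest) head := by
  induction rest with
  | nil => simp [pvRunLen]
  | cons x rs ih =>
    by_cases hx : x = head
    · subst hx
      have ih' := ih (fun y hy => hall y (List.mem_cons_of_mem _ hy)) hp.of_cons
      simp only [pvRunLen, BEq.rfl, if_pos]
      refine ⟨?_, ?_, ?_⟩
      · simp [ih'.1]
      · simpa using ih'.2.1
      · simp [List.replicate_succ, ih'.2.2]
    · have hlt : head < x := lt_of_le_of_ne (hall x (List.mem_cons_self)) (Ne.symm hx)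
      have hnm : head ∉ x :: rs := by
        intro hm
        rcases List.mem_cons.mp hm with h | h
        · exact hx h.symm
        · exact absurd hlt (not_lt.mpr (List.rel_of_pairwise_cons hp h))
      have hbx : (x == head) = false := by simpa using hx
      refine ⟨?_, ?_, ?_⟩
      · simpa [pvRunLen, hbx] using List.count_eq_zero.mpr hnm
      · simpa [pvRunLen, hbx] using hnm
      · simp [pvRunLen, hbx]

-- lookup in the run-length dict of a sorted list
theorem pvRunCounts_getD {α : Type} [BEq α] [LawfulBEq α] [LinearOrder α] :
    ∀ (n : Nat) (ys : List α), ys.length ≤ n → ys.Pairwise (· ≤ ·) →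
      ∀ (d : PySem.Dict α Int) (t : α),
        (pvRunCounts ys d).getD t 0 = if t ∈ ys then (ys.count t : Int) else d.getD t 0 := by
  intro n
  induction n with
  | zero =>
    intro ys hlen _ d t
    have : ys = [] := List.eq_nil_of_length_eq_zero (Nat.le_zero.mp hlen)
    subst this
    rw [pvRunCounts]
    simp
  | succ m ih =>
    intro ys hlen hp d t
    match ys with
    | [] => rw [pvRunCounts]; simp
    | head :: rest =>
      have hall : ∀ y ∈ rest, head ≤ y := fun y hy => List.rel_of_pairwise_cons hp hy
      obtain ⟨hcnt, hnm, hrep⟩ := pvRunStruct head rest hall hp.of_cons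
      set r := pvRunLen head rest with hr
      have hdlen : (rest.drop r).length ≤ m := by
        simp only [List.length_drop]
        simp only [List.length_cons] at hlen
        omega
      have hdp : (rest.drop r).Pairwise (· ≤ ·) := hp.of_cons.sublist (List.drop_sublist _ _)
      have hsplit : rest = List.replicate r head ++ rest.drop r := by
        conv_lhs => rw [← List.take_append_drop r rest]
        rw [hrep]
      rw [pvRunCounts]
      rw [ih _ hdlen hdp]
      by_cases hm : t ∈ rest.drop r
      · have hth : t ≠ head := fun h => hnm (h ▸ hm)
        have htm : t ∈ head :: rest := by
          rw [hsplit]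
          simp [hm]
        rw [if_pos hm, if_pos htm]
        have : (head :: rest).count t = (rest.drop r).count t := by
          rw [hsplit]
          simp [List.count_append, List.count_replicate, Ne.symm hth]
        rw [this]
      · rw [if_neg hm]
        by_cases hth : t = head
        · subst hth
          rw [PySem.Dict.getD_insert_self, if_pos List.mem_cons_self]
          have : (t :: rest).count t = 1 + r := by
            simp [hcnt, Nat.add_comm]
          rw [this]
        · rw [PySem.Dict.getD_insert_of_ne _ _ _ hth]
          have htm : t ∉ head :: rest := by
            rw [hsplit]
            simp only [List.mem_cons, List.mem_append, List.mem_replicate]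
            rintro (h | ⟨_, h⟩ | h)
            · exact hth h
            · exact hth h
            · exact hm h
          rw [if_neg htm]

-- run_counts(xs)[t] = xs.count(t) for t drawn from xs
theorem pvRunCountsOf_getD {α : Type} [BEq α] [LawfulBEq α] [LinearOrder α]
    (xs : List α) (t : α) (ht : t ∈ xs) :
    (pvRunCountsOf xs).getD t 0 = (xs.count t : Int) := by
  have hperm := PySem.List.sorted_perm xs (fun x => x) false
  have hp : (PySem.List.sorted xs (fun x => x) false).Pairwise (· ≤ ·) := by
    simpa using PySem.List.sorted_pairwise xs (fun x => x)
  have hmem : t ∈ PySem.List.sorted xs (fun x => x) false :=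
    (PySem.List.mem_sorted xs (fun x => x) false t).mpr ht
  rw [pvRunCountsOf, pvRunCounts_getD (PySem.List.sorted xs (fun x => x) false).length _
    le_rfl hp, if_pos hmem, hperm.count_eq]

theorem get_trigrams_eq_alt (texts : List String) :
    get_trigrams texts = get_trigrams_alt texts := by
  simp only [get_trigrams, get_trigrams_alt, pyA_body_eq, pvSplit, pvAccSplit, List.nil_append]
  rw [pvCharCounter pvC0, pvCharCounter pvC1]
  have htri : (texts.flatMap pvKeyf).foldl (pvStep (texts.length : Int)) PySem.Dict.empty =
      (PySem.List.dedup (texts.flatMap pvKeyf)).foldl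
        (fun d t => d.insert t ((pvRunCountsOf (texts.flatMap pvKeyf)).getD t 0 * (texts.length : Int)))
        PySem.Dict.empty := by
    apply PySem.Dict.ext
    rw [pvItemsA, pvItemsB]
    simp only [PySem.List.dedup_eq_ofList]
    refine List.map_congr_left fun k hk => ?_
    have hkm : k ∈ texts.flatMap pvKeyf := (PySem.Set.mem_ofList _ k).mp hk
    rw [pvRunCountsOf_getD _ _ hkm]
  rw [← htri]
  refine congrArg PySem.Dict.items ?_
  simp only [PySem.Dict.keys_counter, ← PySem.List.dedup_eq_ofList]
  refine PySem.List.foldl_congr_mem' _ _ _ _ fun s hs t => ?_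
  refine PySem.List.foldl_congr_mem' _ _ _ _ fun e he t => ?_
  rw [PySem.Dict.getD_counter, PySem.Dict.getD_counter,
    pvRunCountsOf_getD _ _ ((PySem.List.mem_dedup _ s).mp hs),
    pvRunCountsOf_getD _ _ ((PySem.List.mem_dedup _ e).mp he)]

-- ===== VERDICT =====
theorem get_trigrams_spec : Claim_equal_get_trigrams := by
  intro texts _ _
  unfold Spec_get_trigrams
  exact get_trigrams_eq_alt texts
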